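-- pv_equiv track=rewrite | github.com/vikashvishnu1508/algo | LeetCode/DailyInteviewProChallenges/Closest to 3 Sum.py | replaceOrderSmallNum
-- ===== SOURCE A (Python) =====
-- def replaceOrderSmallNum(array, number):
--     i = 0
--     startReplace = False
--     while i < len(array):
--         if startReplace:
--             curNum = array[i]
--             array[i] = replaceNum
--             replaceNum = curNum
--         if not startReplace and array[i] > number:
--             startReplace = True
--             replaceNum = array[i]
--             array[i] = number
--         i += 1
--     return array
-- ===== SOURCE B (Python) =====
-- def replaceOrderSmallNum(array, number):
--     idx = next((i for i, x in enumerate(array) if x > number), None)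
--     if idx is not None:
--         array.insert(idx, number)
--         array.pop()
--     return array
-- ===== Notes on version B (the rewrite author's own statement) =====
-- stated objective: simpler
-- what changed: replaces the cascading element-by-element carry loop by a locate-then-splice: find the first index whose element exceeds number, insert number there and drop the last element.
import Mathlib
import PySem

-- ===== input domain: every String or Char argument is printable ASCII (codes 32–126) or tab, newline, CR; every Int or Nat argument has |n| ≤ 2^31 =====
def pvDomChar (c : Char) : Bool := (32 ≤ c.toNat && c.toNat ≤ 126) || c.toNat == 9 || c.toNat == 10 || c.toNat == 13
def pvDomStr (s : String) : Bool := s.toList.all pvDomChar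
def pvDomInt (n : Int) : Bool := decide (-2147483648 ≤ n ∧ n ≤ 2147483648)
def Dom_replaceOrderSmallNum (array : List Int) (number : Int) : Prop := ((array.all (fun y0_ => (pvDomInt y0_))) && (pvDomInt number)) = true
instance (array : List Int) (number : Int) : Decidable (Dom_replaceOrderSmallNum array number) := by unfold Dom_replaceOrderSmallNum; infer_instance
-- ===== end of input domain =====

-- B replaces A's cascading element-by-element carry loop by locate-then-splice (find first
-- larger element, insert, drop last); both Pythons mutate `array` in place to the same final
-- contents, and the equivalence proved here is about the returned value.

-- ===== PORT A =====
-- A's single front-to-back pass: state (startReplace, replaceNum) carried along the list;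
-- before the first element > number, elements are kept; at it, number is written and the
-- carry starts; afterwards each position receives the carry and yields its old value.
-- (replaceNum is uninitialised in Python until startReplace; the 0 passed in is never read.)
def replaceOrderSmallNumGo (number : Int) : List Int → Bool → Int → List Int
  | [], _, _ => []
  | x :: xs, started, rep =>
    if started then
      rep :: replaceOrderSmallNumGo number xs true x
    else if x > number then
      number :: replaceOrderSmallNumGo number xs true x
    else
      x :: replaceOrderSmallNumGo number xs false rep

def replaceOrderSmallNum (array : List Int) (number : Int) : List Int :=
  replaceOrderSmallNumGo number array false 0

-- ===== PORT B =====
def replaceOrderSmallNum_alt (array : List Int) (number : Int) : List Int :=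
  match array.findIdx? (fun x => x > number) with
  | none => array
  | some idx => (array.insertIdx idx number).dropLast

-- ===== PRECONDITION & SPEC =====
def Spec_replaceOrderSmallNum (array : List Int) (number : Int) (out : List Int) : Prop := out = replaceOrderSmallNum_alt array number
instance (array : List Int) (number : Int) (out : List Int) : Decidable (Spec_replaceOrderSmallNum array number out) := by unfold Spec_replaceOrderSmallNum; infer_instance

-- ===== CLAIM (what is proved, stated in full; the proofs are below) =====
def Claim_equal_replaceOrderSmallNum : Prop := ∀ (array : List Int) (number : Int), Dom_replaceOrderSmallNum array number → Spec_replaceOrderSmallNum array number (replaceOrderSmallNum array number)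

-- ===== LEMMAS AND PROOFS =====

-- Once started, the pass shifts everything right by one and drops the last element.
theorem replaceOrderSmallNumGo_started (number : Int) (xs : List Int) (rep : Int) :
    replaceOrderSmallNumGo number xs true rep = (rep :: xs).dropLast := by
  induction xs generalizing rep with
  | nil => simp [replaceOrderSmallNumGo]
  | cons x xs ih =>
    simp only [replaceOrderSmallNumGo]
    rw [ih]
    cases xs <;> simp

theorem replaceOrderSmallNumGo_not_started (number : Int) (xs : List Int) (rep : Int) :
    replaceOrderSmallNumGo number xs false rep =
      match xs.findIdx? (fun x => x > number) with
      | none => xs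
      | some idx => (xs.insertIdx idx number).dropLast := by
  induction xs generalizing rep with
  | nil => simp [replaceOrderSmallNumGo]
  | cons x xs ih =>
    by_cases h : x > number
    · simp only [replaceOrderSmallNumGo, Bool.false_eq_true, if_false, if_pos h,
        List.findIdx?_cons, decide_eq_true h]
      rw [replaceOrderSmallNumGo_started]
      simp [List.insertIdx]
    · simp only [replaceOrderSmallNumGo, Bool.false_eq_true, if_false, if_neg h,
        List.findIdx?_cons, decide_eq_false h]
      rw [ih rep]
      cases hf : xs.findIdx? (fun x => x > number) with
      | none => simp
      | some idx =>
        have hlt : idx < xs.length := by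
          have := List.findIdx?_eq_some_iff_findIdx_eq.mp hf
          omega
        have hne : xs.insertIdx idx number ≠ [] := by
          intro hnil
          have := congrArg List.length hnil
          rw [List.length_insertIdx_of_le_length (le_of_lt hlt)] at this
          simp at this
        simp only [Option.map_some]
        show x :: (xs.insertIdx idx number).dropLast
            = ((x :: xs).insertIdx (idx + 1) number).dropLast
        rw [List.insertIdx_succ_cons, List.dropLast_cons_of_ne_nil hne]

-- ===== VERDICT (by name: the statement is the Claim_ definition above) =====
theorem replaceOrderSmallNum_spec : Claim_equal_replaceOrderSmallNum := by
  intro array number _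
  show replaceOrderSmallNum array number = replaceOrderSmallNum_alt array number
  unfold replaceOrderSmallNum replaceOrderSmallNum_alt
  exact replaceOrderSmallNumGo_not_started number array 0
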